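-- pv_equiv track=rewrite | github.com/tonikarppi/super-frequent-item | always-correct.py | find_super_frequent_item
-- ===== SOURCE A (Python) =====
-- from math import floor
--
-- def find_super_frequent_item(A):
--     n = len(A)
--     A = sorted(A)
--     x = A[floor(n/2)]
--     count = 0
--
--     for i in range(0, n):
--         if A[i] == x:
--             count = count + 1
--
--     if count >= 0.9 * n:
--         return x
--
--     return None
-- ===== SOURCE B (Python) =====
-- def find_super_frequent_item(A):
--     # Boyer-Moore majority vote, then one verification pass.
--     candidate = A[0]
--     count = 0
--     for v in A:
--         if count == 0:
--             candidate = v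
--             count = 1
--         elif v == candidate:
--             count += 1
--         else:
--             count -= 1
--     if A.count(candidate) >= 0.9 * len(A):
--         return candidate
--     return None
-- ===== Notes on version B (the rewrite author's own statement) =====
-- stated objective: alternative
-- what changed: Replaces sort-then-take-median plus a counting loop with a Boyer-Moore majority vote single scan followed by one verification count.
import Mathlib
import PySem

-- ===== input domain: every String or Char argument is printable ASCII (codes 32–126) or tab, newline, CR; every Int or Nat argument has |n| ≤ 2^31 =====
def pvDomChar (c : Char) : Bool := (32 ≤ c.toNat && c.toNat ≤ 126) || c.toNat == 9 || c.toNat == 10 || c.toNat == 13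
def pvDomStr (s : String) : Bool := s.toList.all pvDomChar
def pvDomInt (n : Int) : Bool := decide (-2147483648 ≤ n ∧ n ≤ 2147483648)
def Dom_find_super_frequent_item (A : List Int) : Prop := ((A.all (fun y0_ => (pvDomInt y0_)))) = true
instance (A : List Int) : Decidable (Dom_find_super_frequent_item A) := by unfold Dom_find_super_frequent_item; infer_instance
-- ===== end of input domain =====

-- B replaces sort-then-median with a Boyer-Moore majority vote single scan plus one verification count.
-- ===== PORT A =====
-- 'count >= 0.9 * n' is ported as '10*count >= 9*n': exact, because the double 0.9*n never
-- rounds across an integer (relative error of 0.9*n is < ulp/2 of the nearest multiple of 0.1);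
-- 'floor(n/2)' with n = len(A) >= 0 is exact floor division.
def find_super_frequent_item (A : List Int) : Option Int :=
  -- sort, take the middle element (IndexError when empty), count it, then the threshold test
  match PySem.List.pyGet? (PySem.List.sorted A (fun x => x) false)
      (PySem.Int.floordiv (A.length : Int) 2) with
  | none => none  -- IndexError on the empty list; excluded by Pre_
  | some x =>
    if 10 * ((PySem.List.pyRange 0 (A.length : Int) 1).foldl
        (fun c i => if PySem.List.pyGetD (PySem.List.sorted A (fun x => x) false) i 0 = x
                    then c + 1 else c) (0 : Int)) ≥ 9 * (A.length : Int)
    then some x else none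

-- ===== PORT B =====
def find_super_frequent_item_alt (A : List Int) : Option Int :=
  match PySem.List.pyGet? A 0 with
  | none => none  -- the initial candidate read (first element) raises IndexError on the empty list; excluded by Pre_
  | some c0 =>
    let s := A.foldl
      (fun (s : Int × Int) v =>
        if s.2 = 0 then (v, 1)
        else if v = s.1 then (s.1, s.2 + 1)
        else (s.1, s.2 - 1)) (c0, 0)
    -- 'A.count(candidate) >= 0.9 * len(A)': same exact integer form as in port A
    if 10 * (PySem.List.count A s.1 : Int) ≥ 9 * (A.length : Int) then some s.1 else none

-- ===== PRECONDITION & SPEC =====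
-- Pre_: both programs' initial element access raises IndexError on the empty list.
def Pre_find_super_frequent_item (A : List Int) : Prop := A ≠ []
instance (A : List Int) : Decidable (Pre_find_super_frequent_item A) := by unfold Pre_find_super_frequent_item; infer_instance
def pvWitness_find_super_frequent_item : List Int := [1, 2, 1]
def Spec_find_super_frequent_item (A : List Int) (out : Option Int) : Prop := out = find_super_frequent_item_alt A
instance (A : List Int) (out : Option Int) : Decidable (Spec_find_super_frequent_item A out) := by unfold Spec_find_super_frequent_item; infer_instance

-- ===== CLAIM (what is proved, stated in full; the proofs are below) =====
def Claim_equal_find_super_frequent_item : Prop := ∀ (A : List Int), Dom_find_super_frequent_item A → Pre_find_super_frequent_item A → Spec_find_super_frequent_item A (find_super_frequent_item A)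

-- ===== LEMMAS AND PROOFS =====

-- the Boyer-Moore step and candidate, and the median of the sorted list (proof-only abbreviations)
def bmStep (s : Int × Int) (v : Int) : Int × Int :=
  if s.2 = 0 then (v, 1) else if v = s.1 then (s.1, s.2 + 1) else (s.1, s.2 - 1)

def bmC (A : List Int) : Int := (A.foldl bmStep (A.headI, 0)).1

def medianS (A : List Int) : Int :=
  (PySem.List.sorted A (fun x => x) false).getD (A.length / 2) 0

-- Boyer-Moore invariant: if x retains weighted majority, the final candidate is x.
theorem bm_inv (x : Int) : ∀ (l : List Int) (c k : Int), 0 ≤ k →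
    2 * ((l.count x : Int) + (if c = x then k else 0)) > (l.length : Int) + k →
    (l.foldl bmStep (c, k)).1 = x := by
  intro l
  induction l with
  | nil =>
      intro c k hk h
      simp only [List.count_nil, List.length_nil, List.foldl_nil] at *
      split at h
      · next hc => simp [hc]
      · omega
  | cons a t ih =>
      intro c k hk h
      simp only [List.foldl_cons]
      rw [List.count_cons, List.length_cons] at h
      push_cast at h
      by_cases hk0 : k = 0
      · subst hk0
        simp only [bmStep]
        apply ih a 1 (by omega)
        by_cases hax : a = x <;> by_cases hcx : c = x <;> simp_all
      · by_cases hac : a = c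
        · simp only [bmStep, if_neg hk0, if_pos hac]
          apply ih c (k + 1) (by omega)
          by_cases hcx : c = x
          · subst hcx; simp_all; omega
          · have hax : ¬ a = x := by rw [hac]; exact hcx
            simp_all; omega
        · simp only [bmStep, if_neg hk0, if_neg hac]
          apply ih c (k - 1) (by omega)
          by_cases hcx : c = x <;> by_cases hax : a = x <;> simp_all <;> omega

theorem bm_majority (A : List Int) (x : Int)
    (h : 2 * (A.count x : Int) > (A.length : Int)) : bmC A = x := by
  apply bm_inv x A A.headI 0 le_rfl
  simpa using h

-- In a ≤-sorted list, any strict-majority element sits at every index, in particular at n/2.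
theorem sorted_majority_getElem (s : List Int) (hs : s.Pairwise (· ≤ ·)) (x : Int)
    (h : 2 * (s.count x : Int) > (s.length : Int)) (i : Nat) (hi : i < s.length)
    (h2i : 2 * i ≤ s.length) (h2i' : s.length ≤ 2 * i + 2) : s[i] = x := by
  by_contra hne
  have hsplit : s = s.take (i+1) ++ s.drop (i+1) := (List.take_append_drop (i+1) s).symm
  have hsplit2 : s = s.take i ++ s.drop i := (List.take_append_drop i s).symm
  rcases lt_or_gt_of_ne hne with hlt | hgt
  · -- s[i] < x: every element of take (i+1) is ≤ s[i] < x
    have hcnt : s.count x = (s.drop (i+1)).count x := by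
      conv_lhs => rw [hsplit]
      rw [List.count_append]
      have : (s.take (i+1)).count x = 0 := by
        rw [List.count_eq_zero]
        intro hmem
        obtain ⟨j, hj, hje⟩ := List.mem_iff_getElem.1 hmem
        have hj' : j < i + 1 := lt_of_lt_of_le hj (by simp)
        rw [List.getElem_take] at hje
        have : s[j] ≤ s[i] := by
          rcases Nat.lt_or_ge j i with hji | hji
          · exact List.Pairwise.rel_get_of_lt (by simpa using hs) (by simpa using hji)
          · have : j = i := by omega
            subst this; exact le_rfl
        omega
      omega
    have hlen : (s.drop (i+1)).length = s.length - (i+1) := by simp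
    have : s.count x ≤ s.length - (i+1) := by
      rw [hcnt]; exact hlen ▸ List.count_le_length
    omega
  · -- s[i] > x: every element of drop i is ≥ s[i] > x
    have hcnt : s.count x = (s.take i).count x := by
      conv_lhs => rw [hsplit2]
      rw [List.count_append]
      have : (s.drop i).count x = 0 := by
        rw [List.count_eq_zero]
        intro hmem
        obtain ⟨j, hj, hje⟩ := List.mem_iff_getElem.1 hmem
        rw [List.getElem_drop] at hje
        have hij : i + j < s.length := by simp at hj; omega
        have : s[i] ≤ s[i + j]'hij := by
          rcases Nat.eq_zero_or_pos j with hj0 | hj0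
          · subst hj0; simp
          · exact List.Pairwise.rel_get_of_lt (by simpa using hs) (by simpa using hj0)
        omega
      omega
    have : s.count x ≤ i := by
      rw [hcnt]; exact le_trans List.count_le_length (by simp)
    omega

-- characterization of port A
theorem portA_char (A : List Int) (h : A ≠ []) :
    find_super_frequent_item A =
      (if 10 * (A.count (medianS A) : Int) ≥ 9 * (A.length : Int)
       then some (medianS A) else none) := by
  unfold find_super_frequent_item
  have hperm := PySem.List.sorted_perm A (fun x => x) false
  have hlen : (PySem.List.sorted A (fun x => x) false).length = A.length := hperm.length_eq
  have hn : 0 < A.length := List.length_pos_iff.2 h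
  have hfd : PySem.Int.floordiv ((A.length : Int)) 2 = ((A.length / 2 : Nat) : Int) := by
    exact_mod_cast PySem.Int.floordiv_natCast A.length 2
  have hi : A.length / 2 < (PySem.List.sorted A (fun x => x) false).length := by omega
  rw [hfd, PySem.List.pyGet?_natCast, List.getElem?_eq_getElem hi]
  have hx : (PySem.List.sorted A (fun x => x) false)[A.length / 2] = medianS A := by
    unfold medianS
    rw [List.getD_eq_getElem _ _ hi]
  simp only [hx]
  have hfold : (PySem.List.pyRange 0 (A.length : Int) 1).foldl
      (fun c i => if PySem.List.pyGetD (PySem.List.sorted A (fun x => x) false) i 0 = medianS A then c + 1 else c) (0 : Int)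
      = ((PySem.List.sorted A (fun x => x) false).count (medianS A) : Int) := by
    rw [← hlen]
    rw [PySem.List.foldl_pyRange_zero_pyGetD' (PySem.List.sorted A (fun x => x) false) 0
      (fun c v => if v = medianS A then c + 1 else c) 0]
    rw [PySem.List.foldl_ite_add_one]
    simp only [List.count]
    have hp : (fun (x : Int) => decide (x = medianS A)) = (fun x => x == medianS A) := by
      funext v; rfl
    rw [hp]; ring
  simp only [hfold, hperm.count_eq]

-- characterization of port B
theorem portB_char (A : List Int) (h : A ≠ []) :
    find_super_frequent_item_alt A =
      (if 10 * (A.count (bmC A) : Int) ≥ 9 * (A.length : Int)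
       then some (bmC A) else none) := by
  unfold find_super_frequent_item_alt
  obtain ⟨a, t, rfl⟩ : ∃ a t, A = a :: t := by
    cases A with
    | nil => exact absurd rfl h
    | cons a t => exact ⟨a, t, rfl⟩
  rw [PySem.List.pyGet?_zero_cons]
  rfl

theorem median_of_majority (A : List Int) (h : A ≠ []) (x : Int)
    (hmaj : 2 * (A.count x : Int) > (A.length : Int)) : medianS A = x := by
  have hperm := PySem.List.sorted_perm A (fun x => x) false
  have hcnt : (PySem.List.sorted A (fun x => x) false).count x = A.count x := hperm.count_eq x
  have hlen : (PySem.List.sorted A (fun x => x) false).length = A.length := hperm.length_eq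
  have hpw : (PySem.List.sorted A (fun x => x) false).Pairwise (· ≤ ·) := by
    simpa using PySem.List.sorted_pairwise A (fun x => x)
  have hn : 0 < A.length := List.length_pos_iff.2 h
  have hi : A.length / 2 < (PySem.List.sorted A (fun x => x) false).length := by omega
  have := sorted_majority_getElem _ hpw x (by rw [hcnt, hlen]; exact hmaj) (A.length / 2)
    hi (by omega) (by omega)
  unfold medianS
  rw [List.getD_eq_getElem _ _ hi]
  exact this

-- ===== VERDICT (by name: the statement is the Claim_ definition above) =====
theorem find_super_frequent_item_spec : Claim_equal_find_super_frequent_item := by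
  intro A _ hpre
  unfold Spec_find_super_frequent_item
  rw [portA_char A hpre, portB_char A hpre]
  have hn : 0 < A.length := List.length_pos_iff.2 hpre
  by_cases hA : 10 * (A.count (medianS A) : Int) ≥ 9 * (A.length : Int)
  · have hmaj : 2 * (A.count (medianS A) : Int) > (A.length : Int) := by omega
    have hbm : bmC A = medianS A := bm_majority A _ hmaj
    rw [if_pos hA, hbm, if_pos (hbm ▸ hA)]
  · rw [if_neg hA]
    by_cases hB : 10 * (A.count (bmC A) : Int) ≥ 9 * (A.length : Int)
    · have hmaj : 2 * (A.count (bmC A) : Int) > (A.length : Int) := by omega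
      have := median_of_majority A hpre _ hmaj
      exact absurd (this ▸ hB) hA
    · rw [if_neg hB]
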